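-- pv_equiv track=rewrite | github.com/Ganeshuk/venhen-python | objectOrientedProgramming/Class Methods and Static Methods.py | check
-- ===== SOURCE A (Python) =====
-- def check(id):
--     digit=0
--     word=0
--     for i in range(len(id)):
--         if(id[i].isdigit()):
--             digit+=1
--         else:
--             word+=1
--     return(digit>0 and word>0)
-- ===== SOURCE B (Python) =====
-- def check(id):
--     has_digit = any(c.isdigit() for c in id)
--     has_nondigit = any(not c.isdigit() for c in id)
--     return has_digit and has_nondigit
-- ===== Notes on version B (the rewrite author's own statement) =====
-- stated objective: idiomatic
-- what changed: Replaces the index loop with running digit/word counters and a final tally comparison by two short-circuiting any() existence scans over the characters.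
import Mathlib
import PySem

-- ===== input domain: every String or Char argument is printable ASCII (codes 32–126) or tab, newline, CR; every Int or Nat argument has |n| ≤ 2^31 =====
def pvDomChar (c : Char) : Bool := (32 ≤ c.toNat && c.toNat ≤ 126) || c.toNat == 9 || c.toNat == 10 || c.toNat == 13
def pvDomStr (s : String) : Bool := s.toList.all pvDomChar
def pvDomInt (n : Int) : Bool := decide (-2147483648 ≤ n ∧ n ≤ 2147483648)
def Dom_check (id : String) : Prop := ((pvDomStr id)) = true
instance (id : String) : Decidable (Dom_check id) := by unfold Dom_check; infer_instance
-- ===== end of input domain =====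

-- B replaces A's tally-then-compare counter loop with two short-circuiting existence scans (idiomatic).


-- ===== PORT A =====
-- the for-loop over range(len(id)) indexing id[i] is ported as a fold over the characters,
-- maintaining the same (digit, word) counters in the same branch order
def check (id : String) : Bool :=
  let st := id.toList.foldl
    (fun (st : Int × Int) c =>
      if PySem.Chars.isdigit c then (st.1 + 1, st.2) else (st.1, st.2 + 1))
    (0, 0)
  decide (st.1 > 0) && decide (st.2 > 0)

-- ===== PORT B =====
def check_alt (id : String) : Bool :=
  let has_digit := id.toList.any (fun c => PySem.Chars.isdigit c)
  let has_nondigit := id.toList.any (fun c => !PySem.Chars.isdigit c)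
  has_digit && has_nondigit

-- ===== PRECONDITION & SPEC =====
def Spec_check (id : String) (out : Bool) : Prop := out = check_alt id
instance (id : String) (out : Bool) : Decidable (Spec_check id out) := by unfold Spec_check; infer_instance

-- ===== CLAIM (what is proved, stated in full; the proofs are below) =====
def Claim_equal_check : Prop := ∀ (id : String), Dom_check id → Spec_check id (check id)

-- ===== LEMMAS AND PROOFS =====

-- the counter loop computes the two tallies, shifted by the initial counters
theorem check_fold_eq (l : List Char) (d w : Int) :
    l.foldl (fun (st : Int × Int) c =>
      if PySem.Chars.isdigit c then (st.1 + 1, st.2) else (st.1, st.2 + 1)) (d, w)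
    = (d + l.countP (fun c => PySem.Chars.isdigit c),
       w + l.countP (fun c => !PySem.Chars.isdigit c)) := by
  induction l generalizing d w with
  | nil => simp
  | cons c t ih =>
    by_cases h : PySem.Chars.isdigit c = true <;>
      simp [List.foldl_cons, h, ih] <;> ring

-- ===== VERDICT (by name: the statement is the Claim_ definition above) =====
theorem check_spec : Claim_equal_check := by
  intro id _
  unfold Spec_check check check_alt
  simp only [check_fold_eq]
  rw [Bool.eq_iff_iff]
  simp only [Bool.and_eq_true, decide_eq_true_iff, List.any_eq_true, ← List.countP_pos_iff, gt_iff_lt,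
    show (fun c => PySem.Chars.isdigit c) = PySem.Chars.isdigit from rfl]
  omega
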